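-- pv_equiv track=rewrite | github.com/Nihtt2/ysc_rtk | route_segment_planner.py | _forward_indices
-- ===== SOURCE A (Python) =====
-- def _forward_indices(start_idx, end_idx, n, is_loop):
--     if is_loop:
--         out = [start_idx]
--         i = start_idx
--         while i != end_idx:
--             i = (i + 1) % n
--             out.append(i)
--         return out
--     if start_idx <= end_idx:
--         return list(range(start_idx, end_idx + 1))
--     return []
-- ===== SOURCE B (Python) =====
-- def _forward_indices(start_idx, end_idx, n, is_loop):
--     if is_loop:
--         if start_idx == end_idx:
--             return [start_idx]
--         count = (end_idx - start_idx) % n or n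
--         return [start_idx] + [(start_idx + k) % n for k in range(1, count + 1)]
--     if start_idx <= end_idx:
--         return list(range(start_idx, end_idx + 1))
--     return []
-- ===== Notes on version B (the rewrite author's own statement) =====
-- stated objective: alternative
-- what changed: The data-dependent while loop that walks index by index until it happens to hit end_idx is replaced by computing the step count in closed form, count = (end_idx - start_idx) % n or n, and emitting [start_idx] followed by the modular indices (start_idx + k) % n for k in 1..count; an early return handles start_idx == end_idx without dividing.
-- outside the precondition, e.g. on _forward_indices(5, 0, -3, True): A returns [5, 0], B returns [5]
import Mathlib
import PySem

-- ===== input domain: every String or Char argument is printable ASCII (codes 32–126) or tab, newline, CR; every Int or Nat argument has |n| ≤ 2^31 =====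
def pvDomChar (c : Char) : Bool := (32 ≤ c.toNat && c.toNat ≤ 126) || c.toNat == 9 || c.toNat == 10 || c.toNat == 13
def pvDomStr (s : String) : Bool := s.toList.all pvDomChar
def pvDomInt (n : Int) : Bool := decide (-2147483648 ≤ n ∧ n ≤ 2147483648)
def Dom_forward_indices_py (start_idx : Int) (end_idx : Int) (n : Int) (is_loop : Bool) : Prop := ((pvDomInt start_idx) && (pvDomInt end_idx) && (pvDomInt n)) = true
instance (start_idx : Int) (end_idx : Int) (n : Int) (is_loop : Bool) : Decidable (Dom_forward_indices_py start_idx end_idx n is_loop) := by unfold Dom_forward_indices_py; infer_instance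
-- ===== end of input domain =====

-- B replaces A's step-by-step while loop with a closed-form step count plus modular indexing (alternative, same cost).

-- ===== PORT A =====
-- A's while loop, with fuel: outside Pre_ the Python loop diverges or raises, here the fuel just runs out
def fiGo (end_idx : Int) (n : Int) : Nat → Int → List Int
  | 0, _ => []
  | fuel + 1, i =>
      if i = end_idx then []
      else
        let j := PySem.Int.mod (i + 1) n
        j :: fiGo end_idx n fuel j

def forward_indices_py (start_idx : Int) (end_idx : Int) (n : Int) (is_loop : Bool) : List Int :=
  if is_loop then
    start_idx :: fiGo end_idx n (n.toNat + 1) start_idx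
  else if start_idx ≤ end_idx then
    PySem.List.pyRange start_idx (end_idx + 1) 1
  else []

-- ===== PORT B =====
def forward_indices_py_alt (start_idx : Int) (end_idx : Int) (n : Int) (is_loop : Bool) : List Int :=
  if is_loop then
    if start_idx = end_idx then [start_idx]
    else
      let c0 := PySem.Int.mod (end_idx - start_idx) n
      let c := if c0 = 0 then n else c0   -- Python's `… or n`
      start_idx :: (PySem.List.pyRange 1 (c + 1) 1).map (fun k => PySem.Int.mod (start_idx + k) n)
  else if start_idx ≤ end_idx then
    PySem.List.pyRange start_idx (end_idx + 1) 1
  else []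

-- ===== PRECONDITION & SPEC =====
-- Pre_ restricts the loop case to start = end or a valid modulus with reachable end (0 < n, 0 ≤ end_idx < n):
-- outside it A diverges (unreachable end_idx), raises ZeroDivisionError (n = 0), or — for n < 0 — wraps over
-- negative floored residues, outside the natural domain of a waypoint count n.
def Pre_forward_indices_py (start_idx : Int) (end_idx : Int) (n : Int) (is_loop : Bool) : Prop :=
  is_loop = true → (start_idx = end_idx ∨ (0 < n ∧ 0 ≤ end_idx ∧ end_idx < n))
instance (start_idx : Int) (end_idx : Int) (n : Int) (is_loop : Bool) : Decidable (Pre_forward_indices_py start_idx end_idx n is_loop) := by unfold Pre_forward_indices_py; infer_instance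

def pvWitness_forward_indices_py : Int × Int × Int × Bool := (0, 2, 4, true)

def Spec_forward_indices_py (start_idx : Int) (end_idx : Int) (n : Int) (is_loop : Bool) (out : List Int) : Prop := out = forward_indices_py_alt start_idx end_idx n is_loop
instance (start_idx : Int) (end_idx : Int) (n : Int) (is_loop : Bool) (out : List Int) : Decidable (Spec_forward_indices_py start_idx end_idx n is_loop out) := by unfold Spec_forward_indices_py; infer_instance

-- ===== CLAIM (what is proved, stated in full; the proofs are below) =====
def Claim_equal_forward_indices_py : Prop := ∀ (start_idx : Int) (end_idx : Int) (n : Int) (is_loop : Bool), Dom_forward_indices_py start_idx end_idx n is_loop → Pre_forward_indices_py start_idx end_idx n is_loop → Spec_forward_indices_py start_idx end_idx n is_loop (forward_indices_py start_idx end_idx n is_loop)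

-- ===== LEMMAS AND PROOFS =====

lemma emod_left_add (a b n : Int) : (a % n + b) % n = (a + b) % n := by
  conv_lhs => rw [Int.add_emod, Int.emod_emod_of_dvd _ dvd_rfl, ← Int.add_emod]

/-- A's loop, characterized: if `e` is first reached from `i` after exactly `m + 1` steps,
the loop emits the `m + 1` successive residues. -/
lemma fiGo_spec (e n : Int) (hn : 0 < n) :
    ∀ (m fuel : Nat) (i : Int), m + 1 ≤ fuel → i ≠ e →
      (i + ((m : Int) + 1)) % n = e →
      (∀ k : Nat, 1 ≤ k → k ≤ m → (i + (k : Int)) % n ≠ e) →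
      fiGo e n fuel i = (List.range (m + 1)).map (fun (k : Nat) => (i + 1 + (k : Int)) % n) := by
  intro m
  induction m with
  | zero =>
    intro fuel i hfuel hi hreach _
    obtain ⟨f, rfl⟩ : ∃ f, fuel = f + 1 := ⟨fuel - 1, by omega⟩
    simp only [fiGo, if_neg hi, PySem.Int.mod_eq_emod_of_pos hn]
    have hj : (i + 1) % n = e := by simpa using hreach
    have hnil : fiGo e n f ((i + 1) % n) = [] := by
      rw [hj]; cases f <;> simp [fiGo]
    rw [hnil, hj]
    simp [hj]
  | succ m ih =>
    intro fuel i hfuel hi hreach hmin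
    obtain ⟨f, rfl⟩ : ∃ f, fuel = f + 1 := ⟨fuel - 1, by omega⟩
    simp only [fiGo, if_neg hi, PySem.Int.mod_eq_emod_of_pos hn]
    set j := (i + 1) % n with hjdef
    have hjne : j ≠ e := by
      have := hmin 1 (by omega) (by omega)
      simpa [hjdef] using this
    have hreach' : (j + ((m : Int) + 1)) % n = e := by
      rw [hjdef, emod_left_add]
      have h1 : i + 1 + ((m : Int) + 1) = i + (((m : Int) + 1) + 1) := by ring
      rw [h1]
      simpa [add_assoc] using hreach
    have hmin' : ∀ k : Nat, 1 ≤ k → k ≤ m → (j + (k : Int)) % n ≠ e := by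
      intro k hk1 hk2
      have hk := hmin (k + 1) (by omega) (by omega)
      rw [hjdef, emod_left_add]
      have heq : i + 1 + (k : Int) = i + ((k : Int) + 1) := by ring
      rw [heq]
      simpa [Nat.cast_add] using hk
    rw [ih f j (by omega) hjne hreach' hmin']
    conv_rhs => rw [List.range_succ_eq_map]
    simp only [List.map_cons, List.map_map]
    congr 1
    · simp [hjdef]
    · apply List.map_congr_left
      intro k _
      simp only [Function.comp]
      rw [hjdef, add_assoc, emod_left_add]
      congr 1
      push_cast
      ring

-- ===== VERDICT =====
theorem forward_indices_py_spec : Claim_equal_forward_indices_py := by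
  unfold Claim_equal_forward_indices_py
  intro s e n l _ hpre
  unfold Spec_forward_indices_py forward_indices_py forward_indices_py_alt
  cases l with
  | false => simp
  | true =>
    simp only [if_true]
    by_cases hse : s = e
    · subst hse
      have hnil : fiGo s n (n.toNat + 1) s = [] := by simp [fiGo]
      simp [hnil]
    · rcases hpre rfl with h | ⟨hn, he0, hen⟩
      · exact absurd h hse
      simp only [if_neg hse]
      set c0 := PySem.Int.mod (e - s) n with hc0def
      have hc0 : c0 = (e - s) % n := PySem.Int.mod_eq_emod_of_pos hn
      have hc0nn : 0 ≤ c0 := by rw [hc0]; exact Int.emod_nonneg _ (by omega)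
      have hc0lt : c0 < n := by rw [hc0]; exact Int.emod_lt_of_pos _ hn
      set c : Int := if c0 = 0 then n else c0 with hcdef
      have hc1 : 1 ≤ c := by rw [hcdef]; split <;> omega
      have hcn : c ≤ n := by rw [hcdef]; split <;> omega
      have hcmod : c % n = (e - s) % n := by
        rw [hcdef]; split
        · rw [Int.emod_self, ← hc0, ‹c0 = 0›]
        · rw [← hc0, hc0, Int.emod_emod_of_dvd _ dvd_rfl]
      have hreachc : (s + c) % n = e := by
        have h1 : (s + c) % n = (s + (e - s)) % n := by
          rw [Int.add_emod, hcmod, ← Int.add_emod]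
        rw [h1]
        simp only [add_sub_cancel]
        exact Int.emod_eq_of_lt he0 hen
      have hminc : ∀ d : Int, 1 ≤ d → d < c → (s + d) % n ≠ e := by
        intro d hd1 hd2 habs
        have hdvd : n ∣ (c - d) := by
          apply Int.dvd_of_emod_eq_zero
          have h2 : (c - d) % n = ((s + c) - (s + d)) % n := by ring_nf
          rw [h2, Int.sub_emod, hreachc, habs, sub_self, Int.zero_emod]
        have := Int.le_of_dvd (by omega) hdvd
        omega
      set m : Nat := c.toNat - 1 with hmdef
      have hmc : (m : Int) + 1 = c := by omega
      have hA := fiGo_spec e n hn m (n.toNat + 1) s (by omega) hse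
        (by rw [hmc]; exact hreachc)
        (by
          intro k hk1 hk2
          exact hminc (k : Int) (by exact_mod_cast hk1) (by omega))
      rw [hA]
      rw [PySem.List.pyRange_one, List.map_map]
      have hct : (c + 1 - 1).toNat = m + 1 := by omega
      rw [hct]
      congr 1
      apply List.map_congr_left
      intro k _
      simp only [Function.comp]
      rw [PySem.Int.mod_eq_emod_of_pos hn]
      congr 1
      ring
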